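-- pv_equiv track=rewrite | github.com/benjfield/advent_of_code | advent/year_2019/day_17.py | strip_from_journey
-- ===== SOURCE A (Python) =====
-- def strip_from_journey(to_strip, journey_remainder):
--     a_length = len(to_strip)
--     stripped_journey = []
--     potential_start = 0
--     last_finish = 0
--     while potential_start < len(journey_remainder) - a_length:
--         if journey_remainder[potential_start:potential_start+a_length] == to_strip:
--             remainder = journey_remainder[last_finish:potential_start]
--             if len(remainder) > 0:
--                 stripped_journey.append(remainder)
--             last_finish = potential_start + a_length
--             potential_start += a_length
--         else:
--             potential_start += 1
--
--     remainder = journey_remainder[last_finish:]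
--     if len(remainder) > 0:
--         stripped_journey.append(remainder)
--     return stripped_journey
-- ===== SOURCE B (Python) =====
-- def strip_from_journey(to_strip, journey_remainder):
--     # One for-each pass with a skip counter and a chunk accumulator,
--     # instead of A's index/last_finish bookkeeping with slice extraction.
--     m = len(to_strip)
--     n = len(journey_remainder)
--     out = []
--     cur = []
--     skip = 0
--     for i, x in enumerate(journey_remainder):
--         if skip:
--             skip -= 1
--         elif i + m < n and journey_remainder[i:i + m] == to_strip:
--             if cur:
--                 out.append(cur)
--             cur = []
--             skip = m - 1
--         else:
--             cur.append(x)
--     if cur: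
--         out.append(cur)
--     return out
-- ===== Notes on version B (the rewrite author's own statement) =====
-- stated objective: alternative
-- what changed: Replaced A's index-based while loop with last_finish bookkeeping and slice extraction of each chunk by a single for-each pass that carries a skip counter and accumulates the current chunk element by element.
import Mathlib
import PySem

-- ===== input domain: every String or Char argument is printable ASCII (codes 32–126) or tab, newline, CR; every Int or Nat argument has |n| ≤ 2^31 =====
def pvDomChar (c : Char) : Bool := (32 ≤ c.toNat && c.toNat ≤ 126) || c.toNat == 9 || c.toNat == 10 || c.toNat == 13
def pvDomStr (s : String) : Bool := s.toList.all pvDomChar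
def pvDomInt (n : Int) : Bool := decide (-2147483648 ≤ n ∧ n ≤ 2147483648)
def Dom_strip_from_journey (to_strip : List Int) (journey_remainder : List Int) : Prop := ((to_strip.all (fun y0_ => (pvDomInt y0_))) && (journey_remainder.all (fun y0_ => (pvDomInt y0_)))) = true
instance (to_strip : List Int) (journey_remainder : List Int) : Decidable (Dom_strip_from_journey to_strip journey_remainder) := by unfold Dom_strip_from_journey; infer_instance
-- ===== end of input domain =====

-- B replaces A's index/last_finish while loop (chunks extracted by slicing) with a single
-- for-each pass carrying a skip counter and an element-by-element chunk accumulator;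
-- objective: alternative (same asymptotic cost, different loop structure).


-- ===== PORT A =====
-- A's while loop; state (stripped_journey, potential_start, last_finish). `fuel` only
-- totalizes the loop (when to_strip = [] the Python loop never terminates; that is outside Pre_):
-- with to_strip ≠ [] each iteration increases potential_start by ≥ 1, so fuel = len + 1 is never exhausted.
def stripLoopA (to_strip journey_remainder : List Int) (fuel : Nat)
    (stripped_journey : List (List Int)) (potential_start last_finish : Int) : List (List Int) :=
  match fuel with
  | 0 => []
  | fuel + 1 =>
    if potential_start < (journey_remainder.length : Int) - (to_strip.length : Int) then
      if PySem.List.slice journey_remainder (some potential_start)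
          (some (potential_start + (to_strip.length : Int))) = to_strip then
        let remainder := PySem.List.slice journey_remainder (some last_finish) (some potential_start)
        stripLoopA to_strip journey_remainder fuel
          (if remainder.length > 0 then stripped_journey ++ [remainder] else stripped_journey)
          (potential_start + (to_strip.length : Int)) (potential_start + (to_strip.length : Int))
      else
        stripLoopA to_strip journey_remainder fuel stripped_journey (potential_start + 1) last_finish
    else
      let remainder := PySem.List.slice journey_remainder (some last_finish) none
      if remainder.length > 0 then stripped_journey ++ [remainder] else stripped_journey

def strip_from_journey (to_strip : List Int) (journey_remainder : List Int) : List (List Int) :=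
  stripLoopA to_strip journey_remainder (journey_remainder.length + 1) [] 0 0

-- ===== PORT B =====
-- B's for-each pass over enumerate(journey_remainder): state (out, cur, skip).
def altGo (to_strip journey_remainder : List Int) (l : List Int) (i : Nat) (skip : Nat)
    (cur : List Int) (out : List (List Int)) : List (List Int) :=
  match l with
  | [] => if cur ≠ [] then out ++ [cur] else out
  | x :: rs =>
    if skip ≠ 0 then
      altGo to_strip journey_remainder rs (i + 1) (skip - 1) cur out
    else if i + to_strip.length < journey_remainder.length ∧
        PySem.List.slice journey_remainder (some (i : Int)) (some ((i : Int) + (to_strip.length : Int)))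
          = to_strip then
      altGo to_strip journey_remainder rs (i + 1) (to_strip.length - 1) []
        (out ++ if cur ≠ [] then [cur] else [])
    else
      altGo to_strip journey_remainder rs (i + 1) 0 (cur ++ [x]) out

def strip_from_journey_alt (to_strip : List Int) (journey_remainder : List Int) : List (List Int) :=
  altGo to_strip journey_remainder journey_remainder 0 0 [] []

-- ===== PRECONDITION & SPEC =====
-- Pre_ excludes empty to_strip with a nonempty journey: there Python A (and Python B) loop forever.
def Pre_strip_from_journey (to_strip : List Int) (journey_remainder : List Int) : Prop :=
  to_strip ≠ [] ∨ journey_remainder = []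
instance (to_strip : List Int) (journey_remainder : List Int) : Decidable (Pre_strip_from_journey to_strip journey_remainder) := by unfold Pre_strip_from_journey; infer_instance
def pvWitness_strip_from_journey : List Int × List Int := ([1, 2], [3, 1, 2, 4, 1, 2, 5])

def Spec_strip_from_journey (to_strip : List Int) (journey_remainder : List Int) (out : List (List Int)) : Prop := out = strip_from_journey_alt to_strip journey_remainder
instance (to_strip : List Int) (journey_remainder : List Int) (out : List (List Int)) : Decidable (Spec_strip_from_journey to_strip journey_remainder out) := by unfold Spec_strip_from_journey; infer_instance

-- ===== CLAIM (what is proved, stated in full; the proofs are below) =====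
def Claim_equal_strip_from_journey : Prop := ∀ (to_strip : List Int) (journey_remainder : List Int), Dom_strip_from_journey to_strip journey_remainder → Pre_strip_from_journey to_strip journey_remainder → Spec_strip_from_journey to_strip journey_remainder (strip_from_journey to_strip journey_remainder)

-- ===== LEMMAS AND PROOFS =====

-- the chunk accumulated between last_finish and the current index
def seg (jr : List Int) (a b : Nat) : List Int := (jr.drop a).take (b - a)

-- skip drains: with skip = s and at least s elements left, B just walks past s elements
lemma altGo_skip_drain (ts jr : List Int) :
    ∀ (s : Nat) (l : List Int) (i : Nat) (cur : List Int) (out : List (List Int)),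
      s ≤ l.length →
      altGo ts jr l i s cur out = altGo ts jr (l.drop s) (i + s) 0 cur out := by
  intro s
  induction s with
  | zero => intro l i cur out _; simp
  | succ k ih =>
    intro l i cur out hs
    cases l with
    | nil => simp at hs
    | cons x rs =>
      rw [altGo]
      simp only [if_pos (by omega : k + 1 ≠ 0), Nat.add_sub_cancel]
      rw [ih rs (i + 1) cur out (by simpa using hs), List.drop_succ_cons]
      congr 1
      omega

-- once i + m ≥ n, B's match condition never fires again: everything drains into cur
lemma altGo_drain (ts jr : List Int) :
    ∀ (l : List Int) (i : Nat) (cur : List Int) (out : List (List Int)),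
      jr.length ≤ i + ts.length →
      altGo ts jr l i 0 cur out = if cur ++ l ≠ [] then out ++ [cur ++ l] else out := by
  intro l
  induction l with
  | nil => intro i cur out _; simp [altGo]
  | cons x rs ih =>
    intro i cur out h
    rw [altGo]
    simp only [if_neg (by omega : ¬ (0 : Nat) ≠ 0)]
    rw [if_neg (by intro hc; exact absurd hc.1 (by omega))]
    rw [ih (i + 1) (cur ++ [x]) out (by omega)]
    simp

lemma seg_snoc (jr : List Int) (a p : Nat) (x : Int) (rs : List Int)
    (hap : a ≤ p) (hx : jr.drop p = x :: rs) :
    seg jr a p ++ [x] = seg jr a (p + 1) := by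
  unfold seg
  have hg : (jr.drop a)[p - a]? = some x := by
    rw [List.getElem?_drop]
    have hpa : a + (p - a) = p := by omega
    rw [hpa]
    have := congrArg (fun l => l[0]?) hx
    simpa [List.getElem?_drop] using this
  have h1 : p + 1 - a = (p - a) + 1 := by omega
  rw [h1, List.take_add_one, hg]
  simp

lemma seg_append_drop (jr : List Int) (a p : Nat) (hap : a ≤ p) :
    seg jr a p ++ jr.drop p = jr.drop a := by
  unfold seg
  conv_rhs => rw [← List.take_append_drop (p - a) (jr.drop a)]
  rw [List.drop_drop]
  congr 2
  omega

-- main simulation: A's loop state (p, last, acc) corresponds to B at index p with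
-- skip 0, cur = seg jr last p and the same out
lemma main_sim (ts jr : List Int) (hts : ts ≠ []) :
    ∀ (fuel : Nat) (p last : Nat) (acc : List (List Int)),
      last ≤ p → p ≤ jr.length → jr.length + 1 ≤ fuel + p →
      stripLoopA ts jr fuel acc (p : Int) (last : Int)
        = altGo ts jr (jr.drop p) p 0 (seg jr last p) acc := by
  intro fuel
  induction fuel with
  | zero => intro p last acc _ h2 h3; omega
  | succ f ih =>
    intro p last acc hlp hpn hfuel
    have hm : 0 < ts.length := List.length_pos_iff.mpr hts
    rw [stripLoopA]
    by_cases hcond : (p : Int) < (jr.length : Int) - (ts.length : Int)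
    · have hpm : p + ts.length < jr.length := by omega
      rw [if_pos hcond]
      obtain ⟨x, rs, hxr⟩ : ∃ x rs, jr.drop p = x :: rs := by
        cases hd : jr.drop p with
        | nil =>
          exfalso
          have := congrArg List.length hd
          simp [List.length_drop] at this
          omega
        | cons x rs => exact ⟨x, rs, rfl⟩
      have hrs : rs = jr.drop (p + 1) := by
        have := congrArg List.tail hxr
        simpa [List.tail_drop] using this.symm
      by_cases hmatch : PySem.List.slice jr (some (p : Int)) (some ((p : Int) + (ts.length : Int))) = ts
      · rw [if_pos hmatch]
        have hrem : PySem.List.slice jr (some (last : Int)) (some (p : Int)) = seg jr last p := by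
          rw [PySem.List.slice_natCast]; rfl
        have hcast : (p : Int) + (ts.length : Int) = ((p + ts.length : Nat) : Int) := by push_cast; ring
        rw [hrem, hcast]
        rw [ih (p + ts.length) (p + ts.length) _ le_rfl (by omega) (by omega)]
        have hseg0 : seg jr (p + ts.length) (p + ts.length) = [] := by simp [seg]
        rw [hseg0]
        -- B side makes the same step
        have hB : altGo ts jr (jr.drop p) p 0 (seg jr last p) acc
            = altGo ts jr (jr.drop (p + ts.length)) (p + ts.length) 0 []
                (acc ++ if seg jr last p ≠ [] then [seg jr last p] else []) := by
          rw [hxr, altGo]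
          simp only [if_neg (by omega : ¬ (0 : Nat) ≠ 0)]
          rw [if_pos (show p + ts.length < jr.length ∧
              PySem.List.slice jr (some (p : Int)) (some ((p : Int) + (ts.length : Int))) = ts
              from ⟨hpm, hmatch⟩)]
          rw [altGo_skip_drain ts jr (ts.length - 1) rs (p + 1) [] _
              (by have := congrArg List.length hxr; simp [List.length_drop] at this; omega)]
          have e1 : rs.drop (ts.length - 1) = jr.drop (p + ts.length) := by
            rw [hrs, List.drop_drop]
            congr 1
            omega
          have e2 : p + 1 + (ts.length - 1) = p + ts.length := by omega
          rw [e1, e2]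
        rw [hB]
        congr 1
        by_cases hcur : seg jr last p = [] <;> simp [hcur]
      · rw [if_neg hmatch]
        have hcast : (p : Int) + 1 = ((p + 1 : Nat) : Int) := by push_cast; ring
        rw [hcast, ih (p + 1) last acc (by omega) (by omega) (by omega)]
        rw [hxr, altGo]
        simp only [if_neg (by omega : ¬ (0 : Nat) ≠ 0)]
        rw [if_neg (show ¬ (p + ts.length < jr.length ∧
            PySem.List.slice jr (some (p : Int)) (some ((p : Int) + (ts.length : Int))) = ts)
            from fun hc => hmatch hc.2)]
        rw [seg_snoc jr last p x rs hlp hxr, hrs]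
    · rw [if_neg hcond]
      have hfrom : PySem.List.slice jr (some (last : Int)) none = jr.drop last :=
        PySem.List.slice_from_natCast ..
      rw [hfrom]
      rw [altGo_drain ts jr (jr.drop p) p (seg jr last p) acc (by omega)]
      rw [seg_append_drop jr last p hlp]
      rcases Nat.lt_or_ge last jr.length with hlt | hge
      · rw [if_pos (by simp [List.length_drop]; omega),
            if_pos (show jr.drop last ≠ [] by simp [List.drop_eq_nil_iff]; omega)]
      · rw [List.drop_eq_nil_of_le hge]
        simp

-- ===== VERDICT (by name: the statement is the Claim_ definition above) =====
theorem strip_from_journey_spec : Claim_equal_strip_from_journey := by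
  intro ts jr _ hpre
  unfold Spec_strip_from_journey strip_from_journey strip_from_journey_alt
  rcases hpre with hts | hjr
  · have := main_sim ts jr hts (jr.length + 1) 0 0 [] le_rfl (by omega) (by omega)
    simpa [seg] using this
  · subst hjr
    rw [stripLoopA]
    rw [if_neg (by simp : ¬ (0 : Int) < (([] : List Int).length : Int) - (ts.length : Int))]
    simp [altGo, PySem.List.slice, PySem.List.clampIdx]
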